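-- pv_equiv track=rewrite | github.com/rafaaga/Judges | Python/UVA-12621.py | solve
-- ===== SOURCE A (Python) =====
-- def solve(n, cal, courses, mem):
--     ans = None
--     if (n, cal) in mem: ans = mem[(n, cal)]
--     else:
--         if n == 0 and cal > 0: ans = 250000
--         elif cal <= 0:
--             ans = 0
--         else:
--             ans = min(solve(n - 1, cal, courses, mem), solve(n - 1, cal - (courses[n - 1]), courses, mem) + courses[n - 1])
--         mem[(n,cal)] = ans
--     return ans
-- ===== SOURCE B (Python) =====
-- def solve(n, cal, courses, mem):
--     # Note: A also memoizes its results into the caller's mem dict; B leaves mem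
--     # untouched (return-value equivalence only).
--     if (n, cal) in mem:
--         return mem[(n, cal)]
--     if n == 0 and cal > 0:
--         return 250000
--     if cal <= 0:
--         return 0
--     # phase 1: which (level, calories) states are needed, top-down (need[k] per level k)
--     need = [set() for _ in range(n + 1)]
--     need[n] = {cal}
--     for k in range(n, 0, -1):
--         for c in need[k]:
--             if (k, c) not in mem and c > 0:
--                 need[k - 1].add(c)
--                 need[k - 1].add(c - courses[k - 1])
--     # phase 2: fill the needed states bottom-up
--     val = {}
--     for k in range(n + 1):
--         for c in need[k]:
--             if (k, c) in mem:
--                 val[(k, c)] = mem[(k, c)]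
--             elif k == 0 and c > 0:
--                 val[(k, c)] = 250000
--             elif c <= 0:
--                 val[(k, c)] = 0
--             else:
--                 w = courses[k - 1]
--                 val[(k, c)] = min(val[(k - 1, c)], val[(k - 1, c - w)] + w)
--     return val[(n, cal)]
-- ===== Notes on version B (the rewrite author's own statement) =====
-- stated objective: alternative
-- what changed: A's memoized top-down recursion (mutating the shared mem dict) is replaced by an iterative two-phase DP: a top-down pass computing the set of needed (level, calories) states per level, then a bottom-up pass filling a fresh value table; B never recurses and never mutates the caller's mem.
import Mathlib
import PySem

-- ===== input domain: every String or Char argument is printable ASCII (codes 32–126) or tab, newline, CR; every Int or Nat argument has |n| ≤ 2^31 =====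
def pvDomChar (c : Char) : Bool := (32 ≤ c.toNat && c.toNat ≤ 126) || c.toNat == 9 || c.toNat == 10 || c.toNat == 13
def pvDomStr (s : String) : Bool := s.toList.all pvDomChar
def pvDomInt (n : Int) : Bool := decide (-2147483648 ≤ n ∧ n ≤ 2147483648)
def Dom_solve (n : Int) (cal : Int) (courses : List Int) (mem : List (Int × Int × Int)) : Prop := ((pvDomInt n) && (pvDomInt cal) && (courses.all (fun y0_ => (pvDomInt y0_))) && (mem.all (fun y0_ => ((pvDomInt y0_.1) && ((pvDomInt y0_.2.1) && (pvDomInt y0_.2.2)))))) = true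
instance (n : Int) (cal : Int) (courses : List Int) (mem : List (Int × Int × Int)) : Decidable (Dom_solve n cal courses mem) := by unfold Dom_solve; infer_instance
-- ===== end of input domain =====

-- B replaces A's memoized top-down recursion by a two-phase iterative DP (needed states
-- top-down, values bottom-up); equivalence is about the RETURN value only: A also writes
-- its results into the caller's mem dict, B leaves mem untouched.

-- helper shared by both ports: first-match lookup of key (a, b) in the association list (dict)
def memLookup : List (Int × Int × Int) → Int → Int → Option Int
  | [], _, _ => none
  | e :: t, a, b => if e.1 = a ∧ e.2.1 = b then some e.2.2 else memLookup t a b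

-- ===== PORT A ===== (top-down recursion, memoizing into mem; the mutated dict is threaded as state)
def solveMemo (courses : List Int) (n cal : Int) (mem : List (Int × Int × Int)) :
    Int × List (Int × Int × Int) :=
  match memLookup mem n cal with
  | some v => (v, mem)
  | none =>
    if n = 0 ∧ 0 < cal then (250000, mem ++ [(n, cal, 250000)])
    else if cal ≤ 0 then (0, mem ++ [(n, cal, 0)])
    else if _h : 1 ≤ n then
      let r1 := solveMemo courses (n - 1) cal mem
      let c := (PySem.List.pyGet? courses (n - 1)).getD 0
      let r2 := solveMemo courses (n - 1) (cal - c) r1.2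
      let a := min r1.1 (r2.1 + c)
      (a, r2.2 ++ [(n, cal, a)])
    else (0, mem)   -- unreachable under Pre_: the Python recurses forever here (n < 0, cal > 0, no memo hit)
  termination_by n.toNat
  decreasing_by all_goals omega

def solve (n : Int) (cal : Int) (courses : List Int) (mem : List (Int × Int × Int)) : Int :=
  (solveMemo courses n cal mem).1

-- ===== PORT B ===== (two-phase iterative DP: needed calorie sets per level top-down, then values bottom-up)
def needStep (courses : List Int) (mem : List (Int × Int × Int)) (k : Int)
    (cur : PySem.Set Int) : PySem.Set Int :=
  cur.foldl (fun acc c =>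
    if memLookup mem k c = none ∧ 0 < c then
      PySem.Set.add (PySem.Set.add acc c) (c - (PySem.List.pyGet? courses (k - 1)).getD 0)
    else acc) PySem.Set.empty

def levelsDown (courses : List Int) (mem : List (Int × Int × Int)) :
    Nat → PySem.Set Int → List (PySem.Set Int)
  | 0, cur => [cur]
  | Nat.succ k, cur => cur :: levelsDown courses mem k (needStep courses mem ((k + 1 : Nat) : Int) cur)

def fillLevel (courses : List Int) (mem : List (Int × Int × Int)) (k : Int)
    (val : PySem.Dict (Int × Int) Int) (s : PySem.Set Int) : PySem.Dict (Int × Int) Int :=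
  s.foldl (fun val c =>
    match memLookup mem k c with
    | some v => val.insert (k, c) v
    | none =>
      if k = 0 ∧ 0 < c then val.insert (k, c) 250000
      else if c ≤ 0 then val.insert (k, c) 0
      else
        let w := (PySem.List.pyGet? courses (k - 1)).getD 0
        val.insert (k, c) (min (val.getD (k - 1, c) 0) (val.getD (k - 1, c - w) 0 + w))) val

def fillUp (courses : List Int) (mem : List (Int × Int × Int)) :
    List (PySem.Set Int) → Int → PySem.Dict (Int × Int) Int → PySem.Dict (Int × Int) Int
  | [], _, val => val
  | s :: rest, k, val => fillUp courses mem rest (k + 1) (fillLevel courses mem k val s)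

def solve_alt (n : Int) (cal : Int) (courses : List Int) (mem : List (Int × Int × Int)) : Int :=
  match memLookup mem n cal with
  | some v => v
  | none =>
    if n = 0 ∧ 0 < cal then 250000
    else if cal ≤ 0 then 0
    else if 1 ≤ n then
      let levels := levelsDown courses mem n.toNat (PySem.Set.ofList [cal])
      (fillUp courses mem levels.reverse 0 PySem.Dict.empty).getD (n, cal) 0
    else 0   -- unreachable under Pre_: the Python B raises here (n < 0)

-- ===== PRECONDITION & SPEC =====
-- Pre_ excludes exactly the inputs where the Python A does not return: cal > 0 with no
-- memo hit and n < 0 (infinite recursion / RecursionError) or n > len(courses) (IndexError).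
def Pre_solve (n : Int) (cal : Int) (courses : List Int) (mem : List (Int × Int × Int)) : Prop :=
  (0 ≤ n ∧ n ≤ courses.length) ∨ cal ≤ 0 ∨ (∃ e ∈ mem, e.1 = n ∧ e.2.1 = cal)
instance (n : Int) (cal : Int) (courses : List Int) (mem : List (Int × Int × Int)) : Decidable (Pre_solve n cal courses mem) := by unfold Pre_solve; infer_instance

def pvWitness_solve : Int × Int × List Int × (List (Int × Int × Int)) := (2, 5, [3, 4], [])

def Spec_solve (n : Int) (cal : Int) (courses : List Int) (mem : List (Int × Int × Int)) (out : Int) : Prop := out = solve_alt n cal courses mem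
instance (n : Int) (cal : Int) (courses : List Int) (mem : List (Int × Int × Int)) (out : Int) : Decidable (Spec_solve n cal courses mem out) := by unfold Spec_solve; infer_instance

-- ===== CLAIM (what is proved, stated in full; the proofs are below) =====
def Claim_equal_solve : Prop := ∀ (n : Int) (cal : Int) (courses : List Int) (mem : List (Int × Int × Int)), Dom_solve n cal courses mem → Pre_solve n cal courses mem → Spec_solve n cal courses mem (solve n cal courses mem)

-- ===== LEMMAS AND PROOFS =====

-- the common mathematical spec: the pure memo-free recursion, with the initial dict as overrides
def fSpec (courses : List Int) (mem : List (Int × Int × Int)) : Nat → Int → Int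
  | 0, c =>
    match memLookup mem 0 c with
    | some v => v
    | none => if 0 < c then 250000 else 0
  | k + 1, c =>
    match memLookup mem ((k + 1 : Nat) : Int) c with
    | some v => v
    | none =>
      if c ≤ 0 then 0
      else
        let w := (PySem.List.pyGet? courses (k : Int)).getD 0
        min (fSpec courses mem k c) (fSpec courses mem k (c - w) + w)

lemma memLookup_append (m : List (Int × Int × Int)) (e : Int × Int × Int) (a b : Int) :
    memLookup (m ++ [e]) a b =
      ((memLookup m a b).orElse (fun _ => if e.1 = a ∧ e.2.1 = b then some e.2.2 else none)) := by
  induction m with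
  | nil => simp [memLookup]
  | cons x t ih => by_cases h : x.1 = a ∧ x.2.1 = b <;> simp [memLookup, h, ih]

lemma memLookup_isSome_iff (m : List (Int × Int × Int)) (a b : Int) :
    (memLookup m a b).isSome ↔ ∃ e ∈ m, e.1 = a ∧ e.2.1 = b := by
  induction m with
  | nil => simp [memLookup]
  | cons x t ih =>
    by_cases h : x.1 = a ∧ x.2.1 = b
    · simp [memLookup, h]
    · simp [memLookup, h, ih]

-- invariant of A's memo dict: it extends mem0, and every entry carries the pure value
def MemInv (courses : List Int) (mem0 m : List (Int × Int × Int)) : Prop :=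
  (∀ a b v, memLookup mem0 a b = some v → memLookup m a b = some v) ∧
  (∀ a b v, memLookup m a b = some v →
      memLookup mem0 a b = some v ∨ (0 ≤ a ∧ v = fSpec courses mem0 a.toNat b))

lemma memInv_insert (courses : List Int) (mem0 m : List (Int × Int × Int)) (k : Nat) (b v : Int)
    (h : MemInv courses mem0 m) (hv : v = fSpec courses mem0 k b) :
    MemInv courses mem0 (m ++ [((k : Int), b, v)]) := by
  constructor
  · intro a b' v' h0
    rw [memLookup_append, h.1 a b' v' h0]
    simp
  · intro a b' v' hl
    rw [memLookup_append] at hl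
    cases hm : memLookup m a b' with
    | some w =>
      rw [hm] at hl
      have hw : w = v' := by simpa using hl
      rcases h.2 a b' w hm with h' | ⟨hh1, hh2⟩
      · exact Or.inl (hw ▸ h')
      · exact Or.inr ⟨hh1, hw ▸ hh2⟩
    | none =>
      rw [hm] at hl
      have hl' : (if (k : Int) = a ∧ b = b' then some v else none) = some v' := by
        simpa using hl
      split at hl'
      · rename_i hcond
        obtain ⟨h1, h2⟩ := hcond
        cases hl'
        refine Or.inr ⟨by omega, ?_⟩
        subst hv
        congr 1
        omega
      · cases hl'

lemma fSpec_of_mem0 (courses : List Int) (mem0 : List (Int × Int × Int)) (k : Nat) (c v : Int)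
    (h : memLookup mem0 (k : Int) c = some v) : fSpec courses mem0 k c = v := by
  cases k with
  | zero => simp only [fSpec]; rw [show ((0:Nat):Int) = 0 from rfl] at h; rw [h]
  | succ k => simp only [fSpec]; rw [h]

lemma solveMemo_eq_fSpec (courses : List Int) (mem0 : List (Int × Int × Int)) :
    ∀ (k : Nat) (c : Int) (m : List (Int × Int × Int)), MemInv courses mem0 m →
      (solveMemo courses (k : Int) c m).1 = fSpec courses mem0 k c ∧
      MemInv courses mem0 (solveMemo courses (k : Int) c m).2 := by
  intro k
  induction k with
  | zero =>
    intro c m hm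
    rw [solveMemo]
    cases h1 : memLookup m 0 c with
    | some v =>
      simp only
      rcases hm.2 0 c v h1 with h0 | ⟨_, hv⟩
      · exact ⟨(fSpec_of_mem0 courses mem0 0 c v h0).symm, hm⟩
      · exact ⟨by simp [hv], hm⟩
    | none =>
      have h0 : memLookup mem0 0 c = none := by
        cases h0 : memLookup mem0 0 c with
        | none => rfl
        | some w => rw [hm.1 0 c w h0] at h1; cases h1
      by_cases hc : 0 < c
      · simp only [hc, and_true]
        refine ⟨by simp [fSpec, h0, hc], ?_⟩
        exact memInv_insert courses mem0 m 0 c 250000 hm (by simp [fSpec, h0, hc])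
      · have hc' : c ≤ 0 := by omega
        simp only [hc, and_false, if_false, if_pos hc']
        refine ⟨by simp [fSpec, h0, hc], ?_⟩
        exact memInv_insert courses mem0 m 0 c 0 hm (by simp [fSpec, h0, hc])
  | succ k ih =>
    intro c m hm
    rw [solveMemo]
    cases h1 : memLookup m ((k+1 : Nat) : Int) c with
    | some v =>
      simp only
      rcases hm.2 _ c v h1 with h0 | ⟨_, hv⟩
      · exact ⟨(fSpec_of_mem0 courses mem0 (k+1) c v h0).symm, hm⟩
      · refine ⟨?_, hm⟩
        have ht : (((k+1 : Nat) : Int)).toNat = k + 1 := by omega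
        rw [hv, ht]
    | none =>
      have h0 : memLookup mem0 ((k+1 : Nat) : Int) c = none := by
        cases h0 : memLookup mem0 ((k+1 : Nat) : Int) c with
        | none => rfl
        | some w => rw [hm.1 _ c w h0] at h1; cases h1
      have h0' : memLookup mem0 ((k : Int) + 1) c = none := by exact_mod_cast h0
      have hn0 : ¬ (((k+1 : Nat) : Int) = 0 ∧ 0 < c) := by
        intro ⟨hh, _⟩; omega
      by_cases hc : c ≤ 0
      · simp only [if_neg hn0, if_pos hc]
        refine ⟨by simp [fSpec, h0', hc], ?_⟩
        exact memInv_insert courses mem0 m (k+1) c 0 hm (by simp [fSpec, h0', hc])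
      · have hge : (1 : Int) ≤ ((k+1 : Nat) : Int) := by omega
        simp only [if_neg hn0, if_neg hc, dif_pos hge]
        have hcast : ((k+1 : Nat) : Int) - 1 = (k : Int) := by omega
        rw [hcast]
        have h1' := ih c m hm
        set w := (PySem.List.pyGet? courses (k : Int)).getD 0 with hw
        have h2' := ih (c - w) (solveMemo courses (k : Int) c m).2 h1'.2
        refine ⟨?_, ?_⟩
        · simp only [h1'.1, h2'.1]
          have hwk : courses[k]?.getD 0 = w := by rw [hw, PySem.List.pyGet?_natCast]
          simp [fSpec, h0', hc, hwk]
        · exact memInv_insert courses mem0 _ (k+1) c _ h2'.2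
            (by simp only [h1'.1, h2'.1]
                have hwk : courses[k]?.getD 0 = w := by rw [hw, PySem.List.pyGet?_natCast]
                simp [fSpec, h0', hc, hwk])


-- ===== B-side lemmas =====

-- the body of fillLevel's fold, and the value it inserts
def bval (courses : List Int) (mem : List (Int × Int × Int)) (k : Int)
    (val : PySem.Dict (Int × Int) Int) (c : Int) : Int :=
  match memLookup mem k c with
  | some v => v
  | none =>
    if k = 0 ∧ 0 < c then 250000
    else if c ≤ 0 then 0
    else
      let w := (PySem.List.pyGet? courses (k - 1)).getD 0
      min (val.getD (k - 1, c) 0) (val.getD (k - 1, c - w) 0 + w)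

def bstep (courses : List Int) (mem : List (Int × Int × Int)) (k : Int)
    (val : PySem.Dict (Int × Int) Int) (c : Int) : PySem.Dict (Int × Int) Int :=
  match memLookup mem k c with
  | some v => val.insert (k, c) v
  | none =>
    if k = 0 ∧ 0 < c then val.insert (k, c) 250000
    else if c ≤ 0 then val.insert (k, c) 0
    else
      let w := (PySem.List.pyGet? courses (k - 1)).getD 0
      val.insert (k, c) (min (val.getD (k - 1, c) 0) (val.getD (k - 1, c - w) 0 + w))

lemma fillLevel_eq_foldl (courses : List Int) (mem : List (Int × Int × Int)) (k : Int)
    (val : PySem.Dict (Int × Int) Int) (s : PySem.Set Int) :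
    fillLevel courses mem k val s = s.foldl (bstep courses mem k) val := rfl

lemma bstep_eq_insert (courses : List Int) (mem : List (Int × Int × Int)) (k : Int)
    (val : PySem.Dict (Int × Int) Int) (c : Int) :
    bstep courses mem k val c = val.insert (k, c) (bval courses mem k val c) := by
  unfold bstep bval
  cases memLookup mem k c with
  | some v => rfl
  | none => split_ifs <;> rfl

lemma foldl_bstep_get?_ne (courses : List Int) (mem : List (Int × Int × Int)) (k : Int) :
    ∀ (l : List Int) (val : PySem.Dict (Int × Int) Int) (p : Int × Int),
      (∀ c ∈ l, p ≠ (k, c)) →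
      (l.foldl (bstep courses mem k) val).get? p = val.get? p := by
  intro l
  induction l with
  | nil => intro val p _; rfl
  | cons a t ih =>
    intro val p hp
    simp only [List.foldl_cons]
    rw [ih _ p (fun c hc => hp c (List.mem_cons_of_mem a hc))]
    rw [bstep_eq_insert]
    exact PySem.Dict.get?_insert_of_ne _ _ (hp a (List.mem_cons_self))

-- phase-1 fold: monotone, adds both children of every qualifying element, keeps Nodup
def nstep (courses : List Int) (mem : List (Int × Int × Int)) (k : Int)
    (acc : PySem.Set Int) (c : Int) : PySem.Set Int :=
  if memLookup mem k c = none ∧ 0 < c then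
    PySem.Set.add (PySem.Set.add acc c) (c - (PySem.List.pyGet? courses (k - 1)).getD 0)
  else acc

lemma needStep_eq_foldl (courses : List Int) (mem : List (Int × Int × Int)) (k : Int)
    (cur : PySem.Set Int) :
    needStep courses mem k cur = cur.foldl (nstep courses mem k) PySem.Set.empty := rfl

lemma mem_nstep (courses : List Int) (mem : List (Int × Int × Int)) (k : Int)
    (acc : PySem.Set Int) (c x : Int) (hx : x ∈ acc) : x ∈ nstep courses mem k acc c := by
  unfold nstep
  split
  · simp [PySem.Set.mem_add, hx]
  · exact hx

lemma mem_foldl_nstep (courses : List Int) (mem : List (Int × Int × Int)) (k : Int) :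
    ∀ (l : List Int) (acc : PySem.Set Int) (x : Int), x ∈ acc →
      x ∈ l.foldl (nstep courses mem k) acc := by
  intro l
  induction l with
  | nil => intro acc x hx; exact hx
  | cons a t ih => intro acc x hx; exact ih _ x (mem_nstep courses mem k acc a x hx)

lemma needStep_mem (courses : List Int) (mem : List (Int × Int × Int)) (k : Int) :
    ∀ (l : List Int) (acc : PySem.Set Int) (c : Int), c ∈ l →
      memLookup mem k c = none → 0 < c →
      c ∈ l.foldl (nstep courses mem k) acc ∧
      c - (PySem.List.pyGet? courses (k - 1)).getD 0 ∈ l.foldl (nstep courses mem k) acc := by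
  intro l
  induction l with
  | nil => intro acc c hc; cases hc
  | cons a t ih =>
    intro acc c hc hml hpos
    rcases List.mem_cons.mp hc with rfl | hct
    · simp only [List.foldl_cons]
      constructor <;>
      · apply mem_foldl_nstep
        unfold nstep
        rw [if_pos ⟨hml, hpos⟩]
        simp [PySem.Set.mem_add]
    · exact ih _ c hct hml hpos

lemma nodup_foldl_nstep (courses : List Int) (mem : List (Int × Int × Int)) (k : Int) :
    ∀ (l : List Int) (acc : PySem.Set Int), acc.Nodup →
      (l.foldl (nstep courses mem k) acc).Nodup := by
  intro l
  induction l with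
  | nil => intro acc h; exact h
  | cons a t ih =>
    intro acc h
    refine ih _ ?_
    unfold nstep
    split
    · exact PySem.Set.nodup_add _ _ (PySem.Set.nodup_add _ _ h)
    · exact h

lemma levelsDown_length (courses : List Int) (mem : List (Int × Int × Int)) :
    ∀ (k : Nat) (cur : PySem.Set Int), (levelsDown courses mem k cur).length = k + 1 := by
  intro k
  induction k with
  | zero => intro cur; rfl
  | succ k ih => intro cur; simp [levelsDown, ih]

lemma fillUp_append (courses : List Int) (mem : List (Int × Int × Int)) :
    ∀ (xs ys : List (PySem.Set Int)) (i : Int) (val : PySem.Dict (Int × Int) Int),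
      fillUp courses mem (xs ++ ys) i val =
      fillUp courses mem ys (i + xs.length) (fillUp courses mem xs i val) := by
  intro xs
  induction xs with
  | nil => intro ys i val; simp [fillUp]
  | cons s t ih =>
    intro ys i val
    simp only [List.cons_append, fillUp, ih]
    congr 1
    simp only [List.length_cons]
    omega

-- level k of phase 2 fills every needed state with its fSpec value
lemma fillLevel_spec (courses : List Int) (mem0 : List (Int × Int × Int)) (j : Nat) :
    ∀ (s : List Int) (val : PySem.Dict (Int × Int) Int), s.Nodup →
      (∀ c ∈ s, memLookup mem0 (j : Int) c = none → 0 < c → j ≠ 0 →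
        val.get? ((j : Int) - 1, c) = some (fSpec courses mem0 (j - 1) c) ∧
        val.get? ((j : Int) - 1, c - (PySem.List.pyGet? courses ((j : Int) - 1)).getD 0) =
          some (fSpec courses mem0 (j - 1) (c - (PySem.List.pyGet? courses ((j : Int) - 1)).getD 0))) →
      ∀ c ∈ s, (s.foldl (bstep courses mem0 (j : Int)) val).get? ((j : Int), c) =
        some (fSpec courses mem0 j c) := by
  intro s
  induction s with
  | nil => intro val _ _ c hc; cases hc
  | cons a t ih =>
    intro val hnd hchild c hc
    simp only [List.foldl_cons]
    rcases List.mem_cons.mp hc with rfl | hct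
    · have hne : ∀ c' ∈ t, ((j : Int), c) ≠ ((j : Int), c') := by
        intro c' hc' heq
        have hcc : c = c' := (Prod.mk.injEq _ _ _ _ ▸ heq).2
        exact (List.nodup_cons.mp hnd).1 (hcc ▸ hc')
      rw [foldl_bstep_get?_ne courses mem0 (j : Int) t _ ((j : Int), c) hne]
      rw [bstep_eq_insert, PySem.Dict.get?_insert_self]
      congr 1
      unfold bval
      cases hml : memLookup mem0 (j : Int) c with
      | some v => exact (fSpec_of_mem0 courses mem0 j c v hml).symm
      | none =>
        cases j with
        | zero =>
          by_cases hcp : 0 < c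
          · rw [if_pos ⟨by norm_num, hcp⟩]
            rw [show ((0 : Nat) : Int) = 0 from rfl] at hml
            simp [fSpec, hml, hcp]
          · rw [if_neg (by intro h; exact hcp h.2), if_pos (by omega)]
            rw [show ((0 : Nat) : Int) = 0 from rfl] at hml
            simp [fSpec, hml, hcp]
        | succ i =>
          have hml' : memLookup mem0 ((i : Int) + 1) c = none := by exact_mod_cast hml
          have hj0 : ¬ (((i + 1 : Nat) : Int) = 0 ∧ 0 < c) := by rintro ⟨h, -⟩; omega
          rw [if_neg hj0]
          by_cases hcle : c ≤ 0
          · rw [if_pos hcle]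
            simp [fSpec, hml', hcle]
          · rw [if_neg hcle]
            have hc1 : ((i + 1 : Nat) : Int) - 1 = (i : Int) := by omega
            have hch := hchild c (List.mem_cons_self) hml (by omega) (by omega)
            simp only [Nat.add_sub_cancel, hc1, PySem.List.pyGet?_natCast] at hch
            simp [fSpec, hml', hcle,
              PySem.Dict.getD_of_get?_eq_some val 0 hch.1, PySem.Dict.getD_of_get?_eq_some val 0 hch.2]
    · refine ih (bstep courses mem0 (j : Int) val a) (List.nodup_cons.mp hnd).2 ?_ c hct
      intro c' hc' hml hpos hj0
      have h2 := hchild c' (List.mem_cons_of_mem a hc') hml hpos hj0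
      have hkey : ∀ x : Int, ((j : Int) - 1, x) ≠ ((j : Int), a) := by
        intro x heq
        have := (Prod.mk.injEq _ _ _ _ ▸ heq).1
        omega
      rw [bstep_eq_insert]
      exact ⟨by rw [PySem.Dict.get?_insert_of_ne _ _ (hkey c')]; exact h2.1,
             by rw [PySem.Dict.get?_insert_of_ne _ _ (hkey _)]; exact h2.2⟩

-- the whole two-phase computation: every state needed at level k holds its fSpec value
lemma fillAll (courses : List Int) (mem0 : List (Int × Int × Int)) :
    ∀ (k : Nat) (cur : PySem.Set Int) (val : PySem.Dict (Int × Int) Int), cur.Nodup →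
      ∀ c ∈ cur,
        (fillUp courses mem0 ((levelsDown courses mem0 k cur).reverse) 0 val).get?
          ((k : Int), c) = some (fSpec courses mem0 k c) := by
  intro k
  induction k with
  | zero =>
    intro cur val hnd c hc
    have h0 : (levelsDown courses mem0 0 cur).reverse = [cur] := rfl
    rw [h0]
    show (fillLevel courses mem0 0 val cur).get? _ = _
    rw [fillLevel_eq_foldl]
    have := fillLevel_spec courses mem0 0 cur val hnd
      (by intro c' _ _ _ h; exact absurd rfl h) c hc
    simpa using this
  | succ k ih =>
    intro cur val hnd c hc
    have hrw : (levelsDown courses mem0 (k + 1) cur).reverse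
        = (levelsDown courses mem0 k (needStep courses mem0 ((k + 1 : Nat) : Int) cur)).reverse
            ++ [cur] := by
      simp [levelsDown]
    rw [hrw, fillUp_append]
    set cur' := needStep courses mem0 ((k + 1 : Nat) : Int) cur with hcur'
    have hlen : ((levelsDown courses mem0 k cur').reverse.length : Int) = (k : Int) + 1 := by
      rw [List.length_reverse, levelsDown_length]; push_cast; ring
    rw [hlen]
    set vi := fillUp courses mem0 (levelsDown courses mem0 k cur').reverse 0 val with hvi
    show (fillLevel courses mem0 (0 + ((k : Int) + 1)) vi cur).get? _ = _
    have hz : (0 : Int) + ((k : Int) + 1) = ((k + 1 : Nat) : Int) := by push_cast; ring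
    rw [hz, fillLevel_eq_foldl]
    refine fillLevel_spec courses mem0 (k + 1) cur vi hnd ?_ c hc
    intro c' hc' hml hpos _
    have hcm := needStep_mem courses mem0 ((k + 1 : Nat) : Int) cur PySem.Set.empty c' hc' hml hpos
    rw [← needStep_eq_foldl, ← hcur'] at hcm
    have hnd' : cur'.Nodup := by
      rw [hcur', needStep_eq_foldl]
      exact nodup_foldl_nstep courses mem0 _ cur PySem.Set.empty (List.nodup_nil)
    have hc1 : ((k + 1 : Nat) : Int) - 1 = (k : Int) := by omega
    have hs1 : (k + 1) - 1 = k := rfl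
    rw [hc1, hs1]
    exact ⟨ih cur' val hnd' c' hcm.1, by
      have := ih cur' val hnd' _ hcm.2
      rwa [hc1] at this⟩

-- ===== VERDICT (by name: the statement is the Claim_ definition above) =====
theorem solve_spec : Claim_equal_solve := by
  intro n cal courses mem _ hpre
  unfold Spec_solve solve solve_alt
  rw [solveMemo]
  cases h1 : memLookup mem n cal with
  | some v => simp
  | none =>
    have hnomem : ¬ ∃ e ∈ mem, e.1 = n ∧ e.2.1 = cal := by
      rw [← memLookup_isSome_iff, h1]; simp
    by_cases hb : n = 0 ∧ 0 < cal
    · simp [hb]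
    · by_cases hc : cal ≤ 0
      · simp [hb, hc]
      · have hpre' : 0 ≤ n ∧ n ≤ courses.length := by
          rcases hpre with h | h | h
          · exact h
          · exact absurd h hc
          · exact absurd h hnomem
        have hn1 : 1 ≤ n := by
          rcases Decidable.em (n = 0) with h0 | h0
          · exact absurd ⟨h0, by omega⟩ hb
          · omega
        simp only [if_neg hb, if_neg hc, dif_pos hn1, if_pos hn1]
        have hInv : MemInv courses mem mem :=
          ⟨fun _ _ _ h => h, fun a b v h => Or.inl h⟩
        have hcastn : ((n.toNat : Nat) : Int) = n := Int.toNat_of_nonneg hpre'.1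
        have hA := (solveMemo_eq_fSpec courses mem n.toNat cal mem hInv).1
        rw [hcastn] at hA
        rw [solveMemo] at hA
        simp only [h1, if_neg hb, if_neg hc, dif_pos hn1] at hA
        have hB := fillAll courses mem n.toNat (PySem.Set.ofList [cal]) PySem.Dict.empty
          (PySem.Set.nodup_ofList _) cal (by simp [PySem.Set.mem_ofList])
        rw [hcastn] at hB
        rw [PySem.Dict.getD_of_get?_eq_some _ 0 hB]
        exact hA
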